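-- pv_equiv track=rewrite | github.com/Prosen-Ghosh/Problem-Solving | Python/Codewars-MinMinMax.py | minMinMax
-- ===== SOURCE A (Python) =====
-- def minMinMax(arr):
--     sortedArr = sorted(arr)
--     min = sortedArr[0]
--     max = sortedArr[-1]
--     minx = min + 1
--     for e in sortedArr[1:-1]:
--         if e == minx:
--             minx = minx + 1
--             continue
--     return [min, minx, max]
-- ===== SOURCE B (Python) =====
-- def minMinMax(arr):
--     mn = mx = arr[0]
--     cnt = {}
--     for e in arr:
--         if e < mn:
--             mn = e
--         if e > mx:
--             mx = e
--         cnt[e] = cnt.get(e, 0) + 1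
--     cnt[mn] -= 1
--     cnt[mx] -= 1
--     x = mn + 1
--     while cnt.get(x, 0) > 0:
--         x += 1
--     return [mn, x, mx]
-- ===== Notes on version B (the rewrite author's own statement) =====
-- stated objective: alternative
-- what changed: replaces sort + linear scan of the sorted middle by a single pass computing min/max and a count dictionary, then climbing from min+1 while the value is still present (with one copy of min and max discounted); O(n) vs O(n log n), though a timing run read only ~1.4x on random inputs
import Mathlib
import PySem

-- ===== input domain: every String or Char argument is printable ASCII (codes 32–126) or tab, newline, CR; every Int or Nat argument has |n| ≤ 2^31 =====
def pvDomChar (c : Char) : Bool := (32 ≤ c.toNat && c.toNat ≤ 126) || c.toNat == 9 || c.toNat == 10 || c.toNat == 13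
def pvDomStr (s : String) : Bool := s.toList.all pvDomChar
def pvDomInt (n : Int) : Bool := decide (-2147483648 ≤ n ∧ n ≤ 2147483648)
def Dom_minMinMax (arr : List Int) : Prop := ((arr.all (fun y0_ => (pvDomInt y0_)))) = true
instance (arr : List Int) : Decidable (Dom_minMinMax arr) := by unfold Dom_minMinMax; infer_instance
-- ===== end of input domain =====

-- B replaces sort + scan of the sorted middle by one pass (min/max + counter) and a climb from min+1; equivalence proved on non-empty lists (both raise IndexError on []).

-- ===== PORT A =====
def minMinMax (arr : List Int) : List Int :=
  let sortedArr := PySem.List.sorted arr (fun x => x) false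
  match PySem.List.pyGet? sortedArr 0, PySem.List.pyGet? sortedArr (-1) with
  | some mn, some mx =>
      let minx := (PySem.List.slice sortedArr (some 1) (some (-1))).foldl
          (fun m e => if e = m then m + 1 else m) (mn + 1)
      [mn, minx, mx]
  | _, _ => []    -- IndexError on the empty list: excluded by Pre_

-- ===== PORT B =====
-- the while loop of Source B; fuel arr.length is enough (proved below)
def pvClimb (cnt : PySem.Dict Int Int) : Nat → Int → Int
  | 0, x => x
  | n + 1, x => if cnt.getD x 0 > 0 then pvClimb cnt n (x + 1) else x

def minMinMax_alt (arr : List Int) : List Int :=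
  match arr with
  | [] => []      -- IndexError on arr[0]: excluded by Pre_
  | a0 :: _ =>
    let st := arr.foldl
      (fun (s : Int × Int × PySem.Dict Int Int) e =>
        ((if e < s.1 then e else s.1),
         (if e > s.2.1 then e else s.2.1),
         s.2.2.insert e (s.2.2.getD e 0 + 1)))
      (a0, a0, PySem.Dict.empty)
    let mn := st.1
    let mx := st.2.1
    let cnt1 := st.2.2.insert mn (st.2.2.getD mn 0 - 1)
    let cnt2 := cnt1.insert mx (cnt1.getD mx 0 - 1)
    [mn, pvClimb cnt2 arr.length (mn + 1), mx]

-- ===== PRECONDITION & SPEC =====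
-- Pre_ excludes only the empty list, on which both A and B raise IndexError.
def Pre_minMinMax (arr : List Int) : Prop := arr ≠ []
instance (arr : List Int) : Decidable (Pre_minMinMax arr) := by unfold Pre_minMinMax; infer_instance
def pvWitness_minMinMax : List Int := [3, 1, 4, 1, 5]

def Spec_minMinMax (arr : List Int) (out : List Int) : Prop := out = minMinMax_alt arr
instance (arr : List Int) (out : List Int) : Decidable (Spec_minMinMax arr out) := by unfold Spec_minMinMax; infer_instance

-- ===== CLAIM (what is proved, stated in full; the proofs are below) =====
def Claim_equal_minMinMax : Prop := ∀ (arr : List Int), Dom_minMinMax arr → Pre_minMinMax arr → Spec_minMinMax arr (minMinMax arr)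


-- ===== LEMMAS AND PROOFS =====

-- r is the first integer ≥ x that is not in l
def pvIsGap (l : List Int) (x r : Int) : Prop :=
  x ≤ r ∧ r ∉ l ∧ ∀ y, x ≤ y → y < r → y ∈ l

theorem pvGap_unique {l : List Int} {x r r' : Int}
    (h : pvIsGap l x r) (h' : pvIsGap l x r') : r = r' := by
  obtain ⟨h1, h2, h3⟩ := h
  obtain ⟨h1', h2', h3'⟩ := h'
  by_contra hne
  rcases lt_or_gt_of_ne hne with hlt | hgt
  · exact h2 (h3' r h1 hlt)
  · exact h2' (h3 r' h1' hgt)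

-- A's scan over a sorted list computes the first gap
theorem pvFold_gap : ∀ (l : List Int) (x : Int), l.Pairwise (· ≤ ·) →
    pvIsGap l x (l.foldl (fun m e => if e = m then m + 1 else m) x) := by
  intro l
  induction l with
  | nil => intro x _; exact ⟨le_refl x, by simp, fun y hy hlt => absurd (lt_of_le_of_lt hy hlt) (lt_irrefl x)⟩
  | cons e t ih =>
    intro x hp
    have he : ∀ y ∈ t, e ≤ y := (List.pairwise_cons.mp hp).1
    have ht : t.Pairwise (· ≤ ·) := (List.pairwise_cons.mp hp).2
    simp only [List.foldl_cons]
    by_cases hex : e = x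
    · simp only [if_pos hex]
      obtain ⟨h1, h2, h3⟩ := ih (x + 1) ht
      refine ⟨by omega, ?_, ?_⟩
      · intro hmem
        rcases List.mem_cons.mp hmem with h | h
        · omega
        · exact h2 h
      · intro y hy hlt
        by_cases hyx : y = x
        · exact List.mem_cons.mpr (Or.inl (by omega))
        · exact List.mem_cons.mpr (Or.inr (h3 y (by omega) hlt))
    · simp only [if_neg hex]
      obtain ⟨h1, h2, h3⟩ := ih x ht
      rcases lt_or_gt_of_ne hex with hlt | hgt
      · -- e < x
        refine ⟨h1, ?_, ?_⟩
        · intro hmem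
          rcases List.mem_cons.mp hmem with h | h
          · omega
          · exact h2 h
        · intro y hy hylt
          exact List.mem_cons.mpr (Or.inr (h3 y hy hylt))
      · -- e > x : the fold stays at x
        have hrx : t.foldl (fun m e => if e = m then m + 1 else m) x = x := by
          by_contra hne
          have hxr : x < t.foldl (fun m e => if e = m then m + 1 else m) x :=
            lt_of_le_of_ne h1 (Ne.symm hne)
          have hx_mem : x ∈ t := h3 x (le_refl x) hxr
          have := he x hx_mem
          omega
        rw [hrx]
        refine ⟨le_refl x, ?_, fun y hy hlt => absurd (lt_of_le_of_lt hy hlt) (lt_irrefl x)⟩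
        intro hmem
        rcases List.mem_cons.mp hmem with h | h
        · omega
        · have := he x h; omega

-- counting split used for the fuel bound
theorem pvCountSplit (l : List Int) (x : Int) :
    (l.filter (fun y => x ≤ y)).length = (l.filter (fun y => x + 1 ≤ y)).length + l.count x := by
  induction l with
  | nil => simp
  | cons a t ih =>
    simp only [List.filter_cons, List.count_cons]
    by_cases h1 : x ≤ a <;> by_cases h2 : x + 1 ≤ a <;> by_cases h3 : a = x <;>
      simp [h1, h2, h3, ih] <;> omega

-- B's climb computes the first gap, given enough fuel and a counter matching l
theorem pvClimb_gap : ∀ (fuel : Nat) (cnt : PySem.Dict Int Int) (l : List Int) (x : Int),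
    (∀ y, x ≤ y → (cnt.getD y 0 > 0 ↔ y ∈ l)) →
    (l.filter (fun y => x ≤ y)).length ≤ fuel →
    pvIsGap l x (pvClimb cnt fuel x) := by
  intro fuel
  induction fuel with
  | zero =>
    intro cnt l x hiff hfuel
    have hx : x ∉ l := by
      intro hx
      have : x ∈ l.filter (fun y => x ≤ y) := List.mem_filter.mpr ⟨hx, by simp⟩
      have := List.length_pos_of_mem this
      omega
    exact ⟨le_refl x, hx, fun y hy hlt => absurd (lt_of_le_of_lt hy hlt) (lt_irrefl x)⟩
  | succ n ih =>
    intro cnt l x hiff hfuel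
    simp only [pvClimb]
    by_cases hc : cnt.getD x 0 > 0
    · simp only [if_pos hc]
      have hx : x ∈ l := (hiff x (le_refl x)).mp hc
      have hcount : 0 < l.count x := List.count_pos_iff.mpr hx
      have hsplit := pvCountSplit l x
      obtain ⟨h1, h2, h3⟩ := ih cnt l (x + 1)
        (fun y hy => hiff y (by omega)) (by omega)
      refine ⟨by omega, h2, ?_⟩
      intro y hy hlt
      by_cases hyx : y = x
      · rwa [hyx]
      · exact h3 y (by omega) hlt
    · simp only [if_neg hc]
      have hx : x ∉ l := fun hm => hc ((hiff x (le_refl x)).mpr hm)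
      exact ⟨le_refl x, hx, fun y hy hlt => absurd (lt_of_le_of_lt hy hlt) (lt_irrefl x)⟩

-- the middle slice sortedArr[1:-1] of m :: t is t.dropLast
theorem pvSlice_middle (a : Int) (t : List Int) :
    PySem.List.slice (a :: t) (some 1) (some (-1)) = t.dropLast := by
  simp only [PySem.List.slice, PySem.List.clampIdx]
  norm_num
  rw [if_neg (show ¬((t.length : Int) < 0) by omega)]
  exact List.dropLast_eq_take.symm

-- B's combined fold splits into three independent folds
theorem pvFoldTriple (l : List Int) (a b : Int) (d : PySem.Dict Int Int) :
    l.foldl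
      (fun (s : Int × Int × PySem.Dict Int Int) e =>
        ((if e < s.1 then e else s.1),
         (if e > s.2.1 then e else s.2.1),
         s.2.2.insert e (s.2.2.getD e 0 + 1)))
      (a, b, d)
    = (l.foldl min a, l.foldl max b,
       l.foldl (fun d e => d.insert e (d.getD e 0 + 1)) d) := by
  induction l generalizing a b d with
  | nil => rfl
  | cons e t ih =>
    simp only [List.foldl_cons]
    have hmn : (if e < a then e else a) = min a e := by rw [min_def]; split_ifs <;> omega
    have hmx : (if e > b then e else b) = max b e := by rw [max_def]; split_ifs <;> omega
    rw [hmn, hmx, ih]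

theorem pvFoldlMin_mem : ∀ (l : List Int) (a : Int), l.foldl min a ∈ a :: l := by
  intro l
  induction l with
  | nil => simp
  | cons e t ih =>
    intro a
    simp only [List.foldl_cons]
    rcases List.mem_cons.mp (ih (min a e)) with h | h
    · rcases min_choice a e with hm | hm <;> rw [hm] at h ⊢ <;> simp [h]
    · simp [h]

theorem pvFoldlMin_le : ∀ (l : List Int) (a : Int), l.foldl min a ≤ a ∧ ∀ y ∈ l, l.foldl min a ≤ y := by
  intro l
  induction l with
  | nil => simp
  | cons e t ih =>
    intro a
    simp only [List.foldl_cons]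
    obtain ⟨h1, h2⟩ := ih (min a e)
    refine ⟨le_trans h1 (min_le_left a e), ?_⟩
    intro y hy
    rcases List.mem_cons.mp hy with h | h
    · rw [h]; exact le_trans h1 (min_le_right a e)
    · exact h2 y h

theorem pvFoldlMax_mem : ∀ (l : List Int) (a : Int), l.foldl max a ∈ a :: l := by
  intro l
  induction l with
  | nil => simp
  | cons e t ih =>
    intro a
    simp only [List.foldl_cons]
    rcases List.mem_cons.mp (ih (max a e)) with h | h
    · rcases max_choice a e with hm | hm <;> rw [hm] at h ⊢ <;> simp [h]
    · simp [h]

theorem pvFoldlMax_ge : ∀ (l : List Int) (a : Int), a ≤ l.foldl max a ∧ ∀ y ∈ l, y ≤ l.foldl max a := by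
  intro l
  induction l with
  | nil => simp
  | cons e t ih =>
    intro a
    simp only [List.foldl_cons]
    obtain ⟨h1, h2⟩ := ih (max a e)
    refine ⟨le_trans (le_max_left a e) h1, ?_⟩
    intro y hy
    rcases List.mem_cons.mp hy with h | h
    · rw [h]; exact le_trans (le_max_right a e) h1
    · exact h2 y h

-- last element of a sorted list bounds everything
theorem pvPairwise_le_getLast : ∀ (l : List Int) (h : l ≠ []), l.Pairwise (· ≤ ·) →
    ∀ y ∈ l, y ≤ l.getLast h := by
  intro l
  induction l with
  | nil => intro h; exact absurd rfl h
  | cons e t ih =>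
    intro h hp y hy
    have he : ∀ y ∈ t, e ≤ y := (List.pairwise_cons.mp hp).1
    have ht : t.Pairwise (· ≤ ·) := (List.pairwise_cons.mp hp).2
    cases t with
    | nil => simp at hy; simp [hy, List.getLast]
    | cons b u =>
      rw [List.getLast_cons (by simp)]
      rcases List.mem_cons.mp hy with h1 | h1
      · subst h1
        exact le_trans (he _ (List.getLast_mem (by simp))) (le_refl _)
      · exact ih (by simp) ht y h1

theorem minMinMax_eq_alt (arr : List Int) (hne : arr ≠ []) :
    minMinMax arr = minMinMax_alt arr := by
  obtain ⟨a0, rest, rfl⟩ : ∃ a0 rest, arr = a0 :: rest := by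
    cases arr with
    | nil => exact absurd rfl hne
    | cons a r => exact ⟨a, r, rfl⟩
  obtain ⟨m, t, hs⟩ : ∃ m t, PySem.List.sorted (a0 :: rest) (fun x => x) false = m :: t := by
    rcases h : PySem.List.sorted (a0 :: rest) (fun x => x) false with _ | ⟨m, t⟩
    · rw [PySem.List.sorted_eq_nil_iff] at h; simp at h
    · exact ⟨m, t, rfl⟩
  have hperm : (m :: t).Perm (a0 :: rest) := hs ▸ PySem.List.sorted_perm ..
  have hpair : (m :: t).Pairwise (· ≤ ·) := by
    have := PySem.List.sorted_pairwise (xs := a0 :: rest) (key := fun x => x)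
    rw [hs] at this; simpa using this
  have hmle : ∀ y ∈ a0 :: rest, m ≤ y := by
    have := PySem.List.key_head_sorted_le _ _ hs
    simpa using this
  have hm_mem : m ∈ a0 :: rest := hperm.mem_iff.mp (List.mem_cons_self)
  -- L : the last element of the sorted list
  have hLex : ∃ L : Int, (m :: t).getLast? = some L := ⟨_, List.getLast?_eq_some_getLast (by simp)⟩
  obtain ⟨L, hLdef⟩ := hLex
  have hLlast : (m :: t).getLast (by simp) = L := by
    have := List.getLast?_eq_some_getLast (l := m :: t) (by simp)
    rw [hLdef] at this
    exact (Option.some_injective _ this.symm)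
  have hL_mem : L ∈ a0 :: rest := hperm.mem_iff.mp (hLlast ▸ List.getLast_mem _)
  have hleL : ∀ y ∈ a0 :: rest, y ≤ L :=
    fun y hy => hLlast ▸ pvPairwise_le_getLast _ (by simp) hpair y (hperm.mem_iff.mpr hy)
  -- B's min and max agree with m and L
  have hmn_eq : (a0 :: rest).foldl min a0 = m := by
    have hvmem : (a0 :: rest).foldl min a0 ∈ a0 :: rest := by
      rcases List.mem_cons.mp (pvFoldlMin_mem (a0 :: rest) a0) with h | h
      · rw [h]; exact List.mem_cons_self
      · exact h
    exact le_antisymm ((pvFoldlMin_le (a0 :: rest) a0).2 m hm_mem) (hmle _ hvmem)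
  have hmx_eq : (a0 :: rest).foldl max a0 = L := by
    have hvmem : (a0 :: rest).foldl max a0 ∈ a0 :: rest := by
      rcases List.mem_cons.mp (pvFoldlMax_mem (a0 :: rest) a0) with h | h
      · rw [h]; exact List.mem_cons_self
      · exact h
    exact le_antisymm (hleL _ hvmem) ((pvFoldlMax_ge (a0 :: rest) a0).2 L hL_mem)
  -- names for the counter dictionaries of B
  set D0 : PySem.Dict Int Int :=
    (a0 :: rest).foldl (fun d e => d.insert e (d.getD e 0 + 1)) PySem.Dict.empty with hD0
  set cnt2 : PySem.Dict Int Int :=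
    (D0.insert m (D0.getD m 0 - 1)).insert L ((D0.insert m (D0.getD m 0 - 1)).getD L 0 - 1) with hcnt2
  -- reduce A to [m, fold over the middle, L]
  have hA : minMinMax (a0 :: rest)
      = [m, (t.dropLast).foldl (fun m e => if e = m then m + 1 else m) (m + 1), L] := by
    simp only [minMinMax]
    rw [hs, PySem.List.pyGet?_zero_cons, PySem.List.pyGet?_neg_one, hLdef, pvSlice_middle]
  -- reduce B to [m, climb, L]
  have hB : minMinMax_alt (a0 :: rest)
      = [m, pvClimb cnt2 (a0 :: rest).length (m + 1), L] := by
    simp only [minMinMax_alt]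
    rw [pvFoldTriple, hmn_eq, hmx_eq]
  -- the final counter counts the middle, above m
  have hbase : ∀ z : Int, D0.getD z 0 = ((a0 :: rest).count z : Int) := by
    intro z
    rw [hD0, PySem.Dict.getD_foldl_insert_add_one]
    simp
  have hcount_t : ∀ z : Int, z ≠ m → ((a0 :: rest).count z) = t.count z := by
    intro z hz
    rw [← hperm.count_eq, List.count_cons_of_ne (Ne.symm hz)]
  have hcnt : ∀ y : Int, m + 1 ≤ y → cnt2.getD y 0 = (t.dropLast.count y : Int) := by
    intro y hy
    rw [hcnt2, PySem.Dict.getD_insert, PySem.Dict.getD_insert, PySem.Dict.getD_insert]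
    cases t with
    | nil =>
      have hLm : L = m := by
        have := hLdef; simp at this; omega
      rw [if_neg (by omega), if_neg (by omega), hbase, hcount_t y (by omega)]
      simp
    | cons b u =>
      have hmid : (b :: u).dropLast ++ [L] = b :: u := by
        have hLdef' : (b :: u).getLast? = some L := by
          rwa [List.getLast?_cons_cons] at hLdef
        have h1 : (b :: u).getLast (by simp) = L := by
          have h2 := List.getLast?_eq_some_getLast (l := b :: u) (by simp)
          rw [hLdef'] at h2
          exact (Option.some_injective _ h2.symm)
        rw [← h1]
        exact List.dropLast_concat_getLast (by simp)
      by_cases hyL : y = L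
      · rw [if_pos hyL, if_neg (by omega), hbase, hcount_t L (by omega)]
        have hc : (b :: u).count L = (b :: u).dropLast.count L + 1 := by
          conv_lhs => rw [← hmid]
          simp [List.count_append]
        rw [hyL, hc]
        push_cast
        ring
      · rw [if_neg hyL, if_neg (by omega), hbase, hcount_t y (by omega)]
        have hc : (b :: u).count y = (b :: u).dropLast.count y := by
          conv_lhs => rw [← hmid]
          rw [List.count_append]
          simp [Ne.symm hyL]
        rw [hc]
  -- both sides compute the first gap above m in the sorted middle
  have hmidpair : (t.dropLast).Pairwise (· ≤ ·) :=
    List.Pairwise.sublist (List.dropLast_sublist t) (List.pairwise_cons.mp hpair).2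
  have gapA := pvFold_gap (t.dropLast) (m + 1) hmidpair
  have hiff : ∀ y : Int, m + 1 ≤ y → (cnt2.getD y 0 > 0 ↔ y ∈ t.dropLast) := by
    intro y hy
    rw [hcnt y hy]
    constructor
    · intro h
      exact List.count_pos_iff.mp (by exact_mod_cast h)
    · intro h
      exact_mod_cast List.count_pos_iff.mpr h
  have hfuel : ((t.dropLast).filter (fun y => m + 1 ≤ y)).length ≤ (a0 :: rest).length := by
    have h1 := List.length_filter_le (fun y => decide (m + 1 ≤ y)) (t.dropLast)
    have h2 : t.dropLast.length = t.length - 1 := List.length_dropLast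
    have h3 : (m :: t).length = (a0 :: rest).length := hperm.length_eq
    simp only [List.length_cons] at h3 ⊢
    omega
  have gapB := pvClimb_gap (a0 :: rest).length cnt2 (t.dropLast) (m + 1) hiff hfuel
  rw [hA, hB]
  simp only [List.cons.injEq, and_true, true_and]
  exact pvGap_unique gapA gapB

-- ===== VERDICT (by name: the statement is the Claim_ definition above) =====
theorem minMinMax_spec : Claim_equal_minMinMax := by
  intro arr _ hpre
  unfold Spec_minMinMax
  exact minMinMax_eq_alt arr hpre
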